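-- pv_equiv track=rewrite | github.com/julAnox/EduWebBack | server/app/tasks.py | calculate_students_lesson_title
-- ===== SOURCE A (Python) =====
-- def calculate_students_lesson_title(data):
--     lessons = ""
--     total_count = 1
--     count = 0
--     for i in data:
--         if count < 2:
--             lessons += i
--             lessons += ' '
--             count += 1
--         else:
--             lessons += i
--             lessons += ' '
--             count += 1
--             if len(data) != total_count:
--                 lessons += "\n"
--             count = 0
--         total_count += 1
--     return lessons
-- ===== SOURCE B (Python) =====
-- def calculate_students_lesson_title(data):
--     groups = []
--     rest = data
--     while rest:
--         groups.append(''.join(item + ' ' for item in rest[:3]))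
--         rest = rest[3:]
--     return '\n'.join(groups)
-- ===== Notes on version B (the rewrite author's own statement) =====
-- stated objective: simpler
-- what changed: Replaced the per-item counter/total_count/reset bookkeeping with an explicit grouping step: render each chunk of three items as one joined string and '\n'.join the chunk strings.
import Mathlib
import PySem

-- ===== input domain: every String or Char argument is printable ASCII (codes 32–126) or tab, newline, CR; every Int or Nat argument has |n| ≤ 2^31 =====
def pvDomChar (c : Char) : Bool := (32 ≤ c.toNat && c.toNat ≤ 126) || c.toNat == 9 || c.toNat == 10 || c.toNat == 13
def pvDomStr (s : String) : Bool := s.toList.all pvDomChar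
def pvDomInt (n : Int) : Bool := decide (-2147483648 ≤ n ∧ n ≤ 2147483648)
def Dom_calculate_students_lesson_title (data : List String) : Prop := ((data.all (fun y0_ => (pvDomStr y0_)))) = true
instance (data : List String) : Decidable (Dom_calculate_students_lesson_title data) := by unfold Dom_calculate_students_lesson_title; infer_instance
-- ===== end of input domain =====

-- B replaces A's per-item counter/reset bookkeeping with an explicit grouping step
-- (render each chunk of three items, then join the chunk strings with newlines); same return value.

-- ===== PORT A =====
def calculate_students_lesson_title (data : List String) : String :=
  (data.foldl
    (fun (st : String × Int × Int) i =>
      let lessons := st.1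
      let total_count := st.2.1
      let count := st.2.2
      if count < 2 then
        (lessons ++ i ++ " ", total_count + 1, count + 1)
      else
        let lessons := lessons ++ i ++ " "
        let lessons := if (data.length : Int) ≠ total_count then lessons ++ "\n" else lessons
        (lessons, total_count + 1, (0 : Int)))
    ("", 1, 0)).1

-- ===== PORT B =====
-- cited by pvAltGo's termination proof: rest[3:] is rest.drop 3
theorem pvSliceFrom3 {α : Type} (l : List α) : PySem.List.slice l (some 3) none = l.drop 3 := by
  simp [pysem]

-- the while loop of B: consume three items per iteration, appending one group string
def pvAltGo (rest : List String) (groups : List String) : List String :=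
  if h : rest.isEmpty then groups
  else
    pvAltGo (PySem.List.slice rest (some 3) none)
      (groups ++ [PySem.Str.join "" ((PySem.List.slice rest none (some 3)).map (fun item => item ++ " "))])
termination_by rest.length
decreasing_by
  have h1 : 0 < rest.length := List.length_pos_of_ne_nil (by simpa using h)
  rw [pvSliceFrom3, List.length_drop]
  omega

def calculate_students_lesson_title_alt (data : List String) : String :=
  PySem.Str.join "\n" (pvAltGo data [])

-- ===== PRECONDITION & SPEC =====
def Spec_calculate_students_lesson_title (data : List String) (out : String) : Prop := out = calculate_students_lesson_title_alt data
instance (data : List String) (out : String) : Decidable (Spec_calculate_students_lesson_title data out) := by unfold Spec_calculate_students_lesson_title; infer_instance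

-- ===== CLAIM (what is proved, stated in full; the proofs are below) =====
def Claim_equal_calculate_students_lesson_title : Prop := ∀ (data : List String), Dom_calculate_students_lesson_title data → Spec_calculate_students_lesson_title data (calculate_students_lesson_title data)

-- ===== LEMMAS AND PROOFS =====

theorem pvSliceTo3 {α : Type} (l : List α) : PySem.List.slice l none (some 3) = l.take 3 := by
  simp [pysem]

theorem join_nil (s : String) : PySem.Str.join s [] = "" := by
  simp [PySem.Str.join, PySem.Chars.join, List.intercalate]

theorem join_one (s a : String) : PySem.Str.join s [a] = a := by
  simp [PySem.Str.join, PySem.Chars.join, List.intercalate]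

theorem joinE_cons (a b : String) (t : List String) :
    PySem.Str.join "" (a :: b :: t) = a ++ PySem.Str.join "" (b :: t) := by
  simp [PySem.Str.join, PySem.Chars.join, List.intercalate, List.intersperse,
    String.ofList_append, String.append_assoc]

theorem joinNL_cons (a b : String) (t : List String) :
    PySem.Str.join "\n" (a :: b :: t) = a ++ ("\n" ++ PySem.Str.join "\n" (b :: t)) := by
  simp only [PySem.Str.join, PySem.Chars.join, List.map_cons, List.intercalate,
    List.intersperse, List.flatten_cons, String.ofList_append, String.ofList_toList]

-- B's result characterised by structural recursion on groups of three (proof helper)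
def altRec (l : List String) : String :=
  if l.length ≤ 3 then PySem.Str.join "" (l.map (fun item => item ++ " "))
  else PySem.Str.join "" ((l.take 3).map (fun item => item ++ " ")) ++ ("\n" ++ altRec (l.drop 3))
termination_by l.length
decreasing_by simp; omega

theorem altRec_nil : altRec [] = "" := by
  rw [altRec]; simp [join_nil]

theorem altRec_one (a : String) : altRec [a] = a ++ " " := by
  conv_lhs => rw [altRec]
  norm_num [join_one]

theorem altRec_two (a b : String) :
    altRec [a, b] = (a ++ " ") ++ (b ++ " ") := by
  conv_lhs => rw [altRec]
  norm_num [joinE_cons, join_one]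

theorem altRec_three (a b c : String) :
    altRec [a, b, c] = (a ++ " ") ++ ((b ++ " ") ++ (c ++ " ")) := by
  conv_lhs => rw [altRec]
  norm_num [joinE_cons, join_one, String.append_assoc]

theorem altRec_cons3 (a b c : String) (rest : List String) (hr : rest ≠ []) :
    altRec (a :: b :: c :: rest)
      = a ++ (" " ++ (b ++ (" " ++ (c ++ (" \n" ++ altRec rest))))) := by
  conv_lhs => rw [altRec]
  have hlen : rest.length ≠ 0 := by simpa using hr
  have h4 : ¬ ((a :: b :: c :: rest).length ≤ 3) := by
    simp only [List.length_cons]; omega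
  have h5 : ¬ (rest.length + 1 + 1 < 3) := by omega
  simp [h4, h5, joinE_cons, join_one, String.append_assoc]
  rw [← String.append_assoc]
  simp

theorem altGo_acc (rest : List String) (groups : List String) :
    pvAltGo rest groups = groups ++ pvAltGo rest [] := by
  match rest with
  | [] =>
    rw [pvAltGo]
    conv_rhs => rw [pvAltGo]
    simp
  | x :: xs =>
    rw [pvAltGo]
    conv_rhs => rw [pvAltGo]
    simp only [List.isEmpty_cons, List.nil_append]
    rw [dif_neg Bool.false_ne_true, dif_neg Bool.false_ne_true, pvSliceFrom3, pvSliceTo3]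
    rw [altGo_acc ((x :: xs).drop 3)
        (groups ++ [PySem.Str.join "" (((x :: xs).take 3).map (fun item => item ++ " "))]),
      altGo_acc ((x :: xs).drop 3)
        [PySem.Str.join "" (((x :: xs).take 3).map (fun item => item ++ " "))]]
    simp
termination_by rest.length
decreasing_by
  all_goals simp

theorem altGo_nonempty (x : String) (xs : List String) : pvAltGo (x :: xs) [] ≠ [] := by
  rw [pvAltGo]
  simp only [List.isEmpty_cons, List.nil_append]
  rw [dif_neg Bool.false_ne_true, altGo_acc]
  simp

theorem altGo_join (rest : List String) :
    PySem.Str.join "\n" (pvAltGo rest []) = altRec rest := by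
  match rest with
  | [] =>
    rw [pvAltGo]
    simp [join_nil, altRec_nil]
  | x :: xs =>
    rw [pvAltGo]
    simp only [List.isEmpty_cons, List.nil_append]
    rw [dif_neg Bool.false_ne_true, altGo_acc, pvSliceFrom3, pvSliceTo3]
    by_cases h3 : (x :: xs).length ≤ 3
    · have hd : (x :: xs).drop 3 = [] := by
        rw [List.drop_eq_nil_iff]; omega
      have ht : (x :: xs).take 3 = x :: xs := List.take_of_length_le h3
      rw [hd, pvAltGo]
      simp only [List.isEmpty_nil]
      rw [dif_pos trivial, List.append_nil, ht, join_one]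
      conv_rhs => rw [altRec]
      simp [h3]
      all_goals
        intro hcon
        exfalso
        simp only [List.length_cons] at h3
        omega
    · have hd : (x :: xs).drop 3 ≠ [] := by
        rw [ne_eq, List.drop_eq_nil_iff]; omega
      obtain ⟨d, ds, hds⟩ := List.exists_cons_of_ne_nil hd
      obtain ⟨y, ys, hy⟩ := List.exists_cons_of_ne_nil (hds ▸ altGo_nonempty d ds)
      have hIH := altGo_join ((x :: xs).drop 3)
      rw [hy] at hIH ⊢
      rw [List.singleton_append, joinNL_cons, hIH]
      conv_rhs => rw [altRec]
      simp [h3]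
      all_goals
        intro hcon
        exfalso
        simp only [List.length_cons] at h3
        omega
termination_by rest.length
decreasing_by
  simp

-- step function of A's fold, with the captured list length abstracted as n
def stepA (n : Int) (st : String × Int × Int) (i : String) : String × Int × Int :=
  let lessons := st.1
  let total_count := st.2.1
  let count := st.2.2
  if count < 2 then
    (lessons ++ i ++ " ", total_count + 1, count + 1)
  else
    let lessons := lessons ++ i ++ " "
    let lessons := if n ≠ total_count then lessons ++ "\n" else lessons
    (lessons, total_count + 1, (0 : Int))

theorem stepA_run (n : Int) (l : List String) (acc : String) (tc : Int)
    (h : tc = n - l.length + 1) :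
    (l.foldl (stepA n) (acc, tc, 0)).1 = acc ++ altRec l := by
  match l with
  | [] => simp [altRec_nil]
  | [a] =>
    have hA : (([a] : List String).foldl (stepA n) (acc, tc, 0)).1 = acc ++ a ++ " " := by
      norm_num [List.foldl, stepA]
    rw [hA, altRec_one, String.append_assoc]
  | [a, b] =>
    have hA : (([a, b] : List String).foldl (stepA n) (acc, tc, 0)).1
        = acc ++ a ++ " " ++ b ++ " " := by
      norm_num [List.foldl, stepA]
    rw [hA, altRec_two]
    simp [String.append_assoc]
  | [a, b, c] =>
    have hno : n = tc + 2 := by simp only [List.length_cons, List.length_nil] at h; omega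
    have hA : (([a, b, c] : List String).foldl (stepA n) (acc, tc, 0)).1
        = acc ++ a ++ " " ++ b ++ " " ++ c ++ " " := by
      norm_num [List.foldl, stepA, hno]
      simp
      omega
    rw [hA, altRec_three]
    simp [String.append_assoc]
  | a :: b :: c :: d :: rest' =>
    have hyes : n ≠ tc + 2 := by simp only [List.length_cons] at h; omega
    have hIH := stepA_run n (d :: rest')
      (acc ++ a ++ " " ++ b ++ " " ++ c ++ " " ++ "\n") (tc + 3)
      (by simp only [List.length_cons] at h ⊢; push_cast at h ⊢; omega)
    have e1 : stepA n (acc, tc, 0) a = (acc ++ a ++ " ", tc + 1, 1) := by norm_num [stepA]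
    have e2 : stepA n (acc ++ a ++ " ", tc + 1, 1) b
        = (acc ++ a ++ " " ++ b ++ " ", tc + 2, 2) := by norm_num [stepA]; ring_nf
    have e3 : stepA n (acc ++ a ++ " " ++ b ++ " ", tc + 2, 2) c
        = (acc ++ a ++ " " ++ b ++ " " ++ c ++ " " ++ "\n", tc + 3, 0) := by
      norm_num [stepA, hyes]; ring_nf
    calc ((a :: b :: c :: d :: rest').foldl (stepA n) (acc, tc, 0)).1
        = ((d :: rest').foldl (stepA n)
            (acc ++ a ++ " " ++ b ++ " " ++ c ++ " " ++ "\n", tc + 3, 0)).1 := by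
          simp only [List.foldl, e1, e2, e3]
      _ = acc ++ a ++ " " ++ b ++ " " ++ c ++ " " ++ "\n"
            ++ altRec (d :: rest') := hIH
      _ = acc ++ altRec (a :: b :: c :: d :: rest') := by
          rw [altRec_cons3 a b c (d :: rest') (by simp)]
          simp [String.append_assoc]

-- ===== VERDICT (by name: the statement is the Claim_ definition above) =====
theorem calculate_students_lesson_title_spec : Claim_equal_calculate_students_lesson_title := by
  intro data _
  unfold Spec_calculate_students_lesson_title
  have hA : calculate_students_lesson_title data
      = (data.foldl (stepA (data.length : Int)) ("", 1, 0)).1 := rfl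
  have hB : calculate_students_lesson_title_alt data
      = PySem.Str.join "\n" (pvAltGo data []) := rfl
  rw [hA, stepA_run (data.length : Int) data "" 1 (by omega), hB, altGo_join]
  simp
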